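-- pv_equiv track=rewrite | github.com/ra7kar/interview-prep | data_structures/non_div_subset.py | non_div_subset
-- ===== SOURCE A (Python) =====
-- def non_div_subset(k, s):
--
--     f = [0] * k
--
--     for i in s:
--         f[i % k] += 1
--
--     result = min(f[0], 1)
--     for i in range(1, (k // 2) + 1):
--         if i != k - i:
--             result += max(f[i], f[k - i])
--         else:
--             result += min(f[i], 1)
--
--     return result
-- ===== SOURCE B (Python) =====
-- def non_div_subset(k, s):
--     cnt = {}
--     for x in s:
--         r = x % k
--         cnt[r] = cnt.get(r, 0) + 1
--     rs = sorted(cnt)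
--     res = 0
--     i, j = 0, len(rs) - 1
--     if rs and rs[0] == 0:
--         res = 1
--         i = 1
--     while i <= j:
--         a, b = rs[i], rs[j]
--         if i == j:
--             res += 1 if 2 * a == k else cnt[a]
--             break
--         if a + b < k:
--             res += cnt[a]
--             i += 1
--         elif a + b > k:
--             res += cnt[b]
--             j -= 1
--         else:
--             res += max(cnt[a], cnt[b])
--             i += 1
--             j -= 1
--     return res
-- ===== Notes on version B (the rewrite author's own statement) =====
-- stated objective: alternative
-- what changed: B sorts the distinct residues and pairs them with a recursive two-pointer scan (smallest vs largest remaining residue, comparing their sum with k), instead of A's dense size-k frequency array scanned over the fixed range(1, k//2+1).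
import Mathlib
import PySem

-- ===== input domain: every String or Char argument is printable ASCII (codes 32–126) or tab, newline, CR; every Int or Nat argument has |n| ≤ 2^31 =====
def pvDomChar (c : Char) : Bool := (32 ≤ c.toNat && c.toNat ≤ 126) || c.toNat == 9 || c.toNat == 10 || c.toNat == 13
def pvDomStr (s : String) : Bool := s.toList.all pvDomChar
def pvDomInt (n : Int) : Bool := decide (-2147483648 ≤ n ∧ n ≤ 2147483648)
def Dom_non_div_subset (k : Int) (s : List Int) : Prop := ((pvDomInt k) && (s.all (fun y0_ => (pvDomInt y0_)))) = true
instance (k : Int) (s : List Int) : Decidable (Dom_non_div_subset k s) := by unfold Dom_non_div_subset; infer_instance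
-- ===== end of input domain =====

-- B pairs the sorted distinct residues with a recursive two-pointer scan (smallest vs largest
-- remaining residue, their sum compared with k) instead of A's dense size-k frequency array
-- scanned over the fixed range(1, k//2+1) (objective: alternative).

-- ===== PORT A =====
-- The Python list f is ported as an Array for constant-time indexing; `f[i % k] += 1` and
-- `f[i]`/`f[k-i]` are exact under Pre_ (1 ≤ k), where every index used is in range (so
-- setIfInBounds always sets and `?.getD 0` never takes its default); `[0] * k` is
-- Array.replicate k.toNat 0 (empty for k ≤ 0).
def non_div_subset (k : Int) (s : List Int) : Int :=
  let f := s.foldl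
    (fun f i => f.setIfInBounds (PySem.Int.mod i k).toNat
      ((f[(PySem.Int.mod i k).toNat]?).getD 0 + 1))
    (Array.replicate k.toNat (0 : Int))
  let result := min ((f[(0 : Nat)]?).getD 0) 1
  (PySem.List.pyRange 1 (PySem.Int.floordiv k 2 + 1)).foldl
    (fun result i =>
      if i ≠ k - i then result + max ((f[i.toNat]?).getD 0) ((f[(k - i).toNat]?).getD 0)
      else result + min ((f[i.toNat]?).getD 0) 1)
    result

-- ===== PORT B =====
-- The while loop `while i <= j` is ported as pvLoop with a structural fuel of len(rs):
-- every iteration either breaks or shrinks j - i by at least 1, so len(rs) iterations always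
-- suffice and the fuel is never exhausted (a totality guard only); rs[i] / rs[j] are pyGet?
-- (indices are in range inside the loop).
def pvLoop (k : Int) (c : PySem.Dict Int Int) (rs : List Int) : Nat → Int → Int → Int → Int
  | 0, _, _, res => res
  | fuel + 1, i, j, res =>
    if i ≤ j then
      let a := (PySem.List.pyGet? rs i).getD 0
      let b := (PySem.List.pyGet? rs j).getD 0
      if i = j then res + (if 2 * a = k then 1 else c.getD a 0)
      else if a + b < k then pvLoop k c rs fuel (i + 1) j (res + c.getD a 0)
      else if a + b > k then pvLoop k c rs fuel i (j - 1) (res + c.getD b 0)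
      else pvLoop k c rs fuel (i + 1) (j - 1) (res + max (c.getD a 0) (c.getD b 0))
    else res

def non_div_subset_alt (k : Int) (s : List Int) : Int :=
  let c := s.foldl
    (fun c x => c.insert (PySem.Int.mod x k) (c.getD (PySem.Int.mod x k) 0 + 1))
    (PySem.Dict.empty : PySem.Dict Int Int)
  let rs := PySem.List.sorted c.keys (fun x => x) false
  -- res = 0; i, j = 0, len(rs) - 1; `if rs and rs[0] == 0:` sets res = 1, i = 1
  if rs.head? = some 0 then pvLoop k c rs rs.length 1 ((rs.length : Int) - 1) 1
  else pvLoop k c rs rs.length 0 ((rs.length : Int) - 1) 0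

-- ===== PRECONDITION & SPEC =====
-- A returns normally exactly when k ≥ 1: for k ≤ 0 the table [0]*k is empty and f[0] or f[i % k]
-- raises (IndexError, or ZeroDivisionError at k = 0 with s nonempty).
def Pre_non_div_subset (k : Int) (s : List Int) : Prop := 1 ≤ k
instance (k : Int) (s : List Int) : Decidable (Pre_non_div_subset k s) := by
  unfold Pre_non_div_subset; infer_instance
def pvWitness_non_div_subset : Int × List Int := (4, [1, 2, 3, 7, 6])

def Spec_non_div_subset (k : Int) (s : List Int) (out : Int) : Prop := out = non_div_subset_alt k s
instance (k : Int) (s : List Int) (out : Int) : Decidable (Spec_non_div_subset k s out) := by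
  unfold Spec_non_div_subset; infer_instance

-- ===== CLAIM (what is proved, stated in full; the proofs are below) =====
def Claim_equal_non_div_subset : Prop := ∀ (k : Int) (s : List Int), Dom_non_div_subset k s → Pre_non_div_subset k s → Spec_non_div_subset k s (non_div_subset k s)

-- ===== LEMMAS AND PROOFS =====

-- number of elements of s whose Python residue mod k is r
def pvCnt (k : Int) (s : List Int) (r : Int) : Int :=
  ((s.map (fun x => PySem.Int.mod x k)).count r : Int)

-- the complementary residue (k - r) % k
def pvPm (k r : Int) : Int := PySem.Int.mod (k - r) k

-- contribution of the pair class represented by r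
def pvContrib (k : Int) (s : List Int) (r : Int) : Int :=
  if pvPm k r = r then min (pvCnt k s r) 1
  else max (pvCnt k s r) (pvCnt k s (pvPm k r))

-- sum of contributions of the representatives 0..k//2 not yet covered by the seen-set S
def pvRem (k : Int) (s : List Int) (S : List Int) : Int :=
  ∑ j ∈ Finset.range (PySem.Int.floordiv k 2 + 1).toNat,
    (if ((j : Int) ∈ S ∨ pvPm k (j : Int) ∈ S) then 0 else pvContrib k s (j : Int))

theorem pvPm_char {k r : Int} (hk : 0 < k) (h0 : 0 ≤ r) (h1 : r < k) :
    pvPm k r = if r = 0 then 0 else k - r := by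
  unfold pvPm
  rw [PySem.Int.mod_eq_emod_of_pos hk]
  split
  · simp [*]
  · exact Int.emod_eq_of_lt (by omega) (by omega)

theorem pvPm_nonneg {k : Int} (r : Int) (hk : 0 < k) : 0 ≤ pvPm k r :=
  PySem.Int.mod_nonneg _ hk

theorem pvPm_lt {k : Int} (r : Int) (hk : 0 < k) : pvPm k r < k :=
  PySem.Int.mod_lt _ hk

theorem pvPm_invol {k r : Int} (hk : 0 < k) (h0 : 0 ≤ r) (h1 : r < k) :
    pvPm k (pvPm k r) = r := by
  rw [pvPm_char hk h0 h1]
  split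
  · rw [pvPm_char hk (by omega) (by omega)]; simp [*]
  · rw [pvPm_char hk (by omega) (by omega)]
    split <;> omega

theorem pvPm_inj {k x y : Int} (hk : 0 < k) (hx0 : 0 ≤ x) (hx1 : x < k)
    (hy0 : 0 ≤ y) (hy1 : y < k) (h : pvPm k x = pvPm k y) : x = y := by
  have := pvPm_invol hk hx0 hx1
  rw [h, pvPm_invol hk hy0 hy1] at this
  omega

-- A's frequency array: after the loop, f[r] counts the elements of s with residue r
theorem pvArrA {k : Int} (hk : 0 < k) (s : List Int) :
    ∀ (f : Array Int), f.size = k.toNat →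
      (s.foldl (fun f i => f.setIfInBounds (PySem.Int.mod i k).toNat
          ((f[(PySem.Int.mod i k).toNat]?).getD 0 + 1)) f).size = k.toNat ∧
      ∀ r : Int, 0 ≤ r → r < k →
        ((s.foldl (fun f i => f.setIfInBounds (PySem.Int.mod i k).toNat
          ((f[(PySem.Int.mod i k).toNat]?).getD 0 + 1)) f)[r.toNat]?).getD 0
        = (f[r.toNat]?).getD 0 + pvCnt k s r := by
  induction s with
  | nil => intro f hf; exact ⟨hf, by simp [pvCnt]⟩
  | cons i t ih =>
    intro f hf
    simp only [List.foldl_cons]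
    have hm0 : 0 ≤ PySem.Int.mod i k := PySem.Int.mod_nonneg _ hk
    have hm1 : PySem.Int.mod i k < k := PySem.Int.mod_lt _ hk
    have hlen : (f.setIfInBounds (PySem.Int.mod i k).toNat
        ((f[(PySem.Int.mod i k).toNat]?).getD 0 + 1)).size = k.toNat := by
      rw [Array.size_setIfInBounds, hf]
    obtain ⟨ihl, ihv⟩ := ih _ hlen
    refine ⟨ihl, ?_⟩
    intro r h0 h1
    rw [ihv r h0 h1]
    rw [Array.getElem?_setIfInBounds]
    have hcnt : pvCnt k (i :: t) r = (if PySem.Int.mod i k = r then 1 else 0) + pvCnt k t r := by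
      simp only [pvCnt, List.map_cons, List.count_cons]
      split <;> simp_all <;> omega
    rw [hcnt]
    by_cases he : PySem.Int.mod i k = r
    · have ht : (PySem.Int.mod i k).toNat = r.toNat := by rw [he]
      rw [if_pos ht, if_pos (by rw [hf]; omega), he, if_pos rfl]
      simp only [Option.getD_some]
      omega
    · have ht : (PySem.Int.mod i k).toNat ≠ r.toNat := by omega
      rw [if_neg ht, if_neg he]
      omega

-- A's value is the sum of the pair-class contributions over representatives 0..k//2
theorem pvA_eq_rem {k : Int} (hk : 0 < k) (s : List Int) :
    non_div_subset k s = pvRem k s [] := by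
  have hd2 : PySem.Int.floordiv k 2 = k / 2 := PySem.Int.floordiv_eq_ediv_of_pos (by omega)
  obtain ⟨hlen, hval⟩ := pvArrA hk s (Array.replicate k.toNat (0 : Int)) (by simp)
  set F : Array Int := s.foldl
    (fun f i => f.setIfInBounds (PySem.Int.mod i k).toNat
      ((f[(PySem.Int.mod i k).toNat]?).getD 0 + 1))
    (Array.replicate k.toNat (0 : Int)) with hFdef
  have hF : ∀ r : Int, 0 ≤ r → r < k → (F[r.toNat]?).getD 0 = pvCnt k s r := by
    intro r h0 h1
    rw [hval r h0 h1, Array.getElem?_replicate, if_pos (by omega)]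
    simp
  have hpm0 : pvPm k 0 = 0 := by rw [pvPm_char hk le_rfl hk]; simp
  show (PySem.List.pyRange 1 (PySem.Int.floordiv k 2 + 1)).foldl
      (fun result i =>
        if i ≠ k - i then result + max ((F[i.toNat]?).getD 0) ((F[(k - i).toNat]?).getD 0)
        else result + min ((F[i.toNat]?).getD 0) 1)
      (min ((F[(0 : Nat)]?).getD 0) 1) = pvRem k s []
  have hcg : (PySem.List.pyRange 1 (PySem.Int.floordiv k 2 + 1)).foldl
      (fun result i =>
        if i ≠ k - i then result + max ((F[i.toNat]?).getD 0) ((F[(k - i).toNat]?).getD 0)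
        else result + min ((F[i.toNat]?).getD 0) 1)
      (min ((F[(0 : Nat)]?).getD 0) 1)
      = (PySem.List.pyRange 1 (PySem.Int.floordiv k 2 + 1)).foldl
        (fun acc i => acc + pvContrib k s i) (min ((F[(0 : Nat)]?).getD 0) 1) := by
    refine PySem.List.foldl_congr_mem _ _ _ _ ?_
    intro acc i hi
    rw [PySem.List.mem_pyRange_one] at hi
    rw [hd2] at hi
    have hik : i < k := by omega
    have hki0 : (0 : Int) ≤ k - i := by omega
    have hkik : k - i < k := by omega
    have hpmi : pvPm k i = k - i := by rw [pvPm_char hk (by omega) hik]; simp; omega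
    simp only [pvContrib, hpmi, hF i (by omega) hik, hF (k - i) hki0 hkik]
    by_cases he : i = k - i
    · rw [if_neg (by omega), if_pos he.symm]
    · rw [if_pos (by omega), if_neg (fun h => he h.symm)]
  rw [hcg, PySem.List.foldl_add]
  have h00 : (F[(0 : Nat)]?).getD 0 = pvCnt k s 0 := by
    have := hF 0 le_rfl hk
    simpa using this
  rw [h00]
  have hmin0 : min (pvCnt k s 0) 1 = pvContrib k s 0 := by
    simp [pvContrib, hpm0]
  rw [hmin0]
  have hN : ((PySem.Int.floordiv k 2 + 1).toNat : Int) = PySem.Int.floordiv k 2 + 1 := by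
    rw [hd2]; omega
  have hsum : pvRem k s [] =
      ((List.range (PySem.Int.floordiv k 2 + 1).toNat).map
        (fun (j : Nat) => pvContrib k s (j : Int))).sum := by
    simp only [pvRem, List.not_mem_nil, or_self, if_false]
    rfl
  rw [hsum]
  have hpy : PySem.List.pyRange 0 (PySem.Int.floordiv k 2 + 1)
      = (List.range (PySem.Int.floordiv k 2 + 1).toNat).map (fun (j : Nat) => (j : Int)) := by
    rw [← hN, PySem.List.pyRange_zero_natCast]
    simp
    congr 2
    omega
  have hcons : PySem.List.pyRange 0 (PySem.Int.floordiv k 2 + 1)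
      = 0 :: PySem.List.pyRange 1 (PySem.Int.floordiv k 2 + 1) := by
    rw [PySem.List.pyRange_one_cons (by rw [hd2]; omega)]
    norm_num
  have : ((List.range (PySem.Int.floordiv k 2 + 1).toNat).map
        (fun (j : Nat) => pvContrib k s (j : Int))).sum
      = ((PySem.List.pyRange 0 (PySem.Int.floordiv k 2 + 1)).map (pvContrib k s)).sum := by
    rw [hpy, List.map_map]
    rfl
  rw [this, hcons, List.map_cons, List.sum_cons]

-- if the seen-set covers every residue that occurs, no contribution remains
theorem pvRem_zero {k : Int} (hk : 0 < k) (s : List Int) (S : List Int)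
    (hcov : ∀ r : Int, 0 ≤ r → r < k → pvCnt k s r ≠ 0 → r ∈ S) :
    pvRem k s S = 0 := by
  have hd2 : PySem.Int.floordiv k 2 = k / 2 := PySem.Int.floordiv_eq_ediv_of_pos (by omega)
  unfold pvRem
  apply Finset.sum_eq_zero
  intro j hj
  rw [Finset.mem_range, hd2] at hj
  have hj2 : (j : Int) ≤ k / 2 := by omega
  have hjk : (j : Int) < k := by omega
  split
  · rfl
  · rename_i hns
    push_neg at hns
    have h1 : pvCnt k s (j : Int) = 0 := by
      by_contra h
      exact hns.1 (hcov _ (by omega) hjk h)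
    have h2 : pvCnt k s (pvPm k (j : Int)) = 0 := by
      by_contra h
      exact hns.2 (hcov _ (pvPm_nonneg _ hk) (pvPm_lt _ hk) h)
    simp [pvContrib, h1, h2]

-- removing one uncovered pair class from the seen-set adds exactly its contribution
theorem pvRem_step {k : Int} (hk : 0 < k) (s : List Int) (S : PySem.Set Int) (r : Int)
    (h0 : 0 ≤ r) (h1 : r < k) (hrS : r ∉ S)
    (hScl : ∀ x ∈ S, pvPm k x ∈ S) :
    pvRem k s S = pvContrib k s r + pvRem k s ((S.add r).add (pvPm k r)) := by
  have hd2 : PySem.Int.floordiv k 2 = k / 2 := PySem.Int.floordiv_eq_ediv_of_pos (by omega)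
  set q := pvPm k r with hq
  have hqchar : q = if r = 0 then 0 else k - r := pvPm_char hk h0 h1
  have hq0 : 0 ≤ q := pvPm_nonneg _ hk
  have hq1 : q < k := pvPm_lt _ hk
  have hqr : pvPm k q = r := pvPm_invol hk h0 h1
  have hqS : q ∉ S := fun h => hrS (by have := hScl q h; rwa [hqr] at this)
  set can := min r q with hcan
  have hcan0 : 0 ≤ can := by omega
  have hcanle : can ≤ k / 2 := by
    rcases eq_or_ne r 0 with h | h
    · simp [h] at hqchar; omega
    · rw [if_neg h] at hqchar; omega
  have hmemS' : ∀ x : Int, x ∈ (S.add r).add q ↔ (x ∈ S ∨ x = r) ∨ x = q := by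
    intro x
    rw [PySem.Set.mem_add, PySem.Set.mem_add]
  have hcanS' : can ∈ (S.add r).add q := by
    rw [hmemS']
    rcases le_or_gt r q with h | h
    · left; right; omega
    · right; omega
  have hcanset : can = r ∨ can = q := by omega
  have hpmcan : pvPm k can = r ∨ pvPm k can = q := by
    rcases hcanset with h | h
    · right; rw [h]
    · left; rw [h]; exact hqr
  have hj0mem : can.toNat ∈ Finset.range (PySem.Int.floordiv k 2 + 1).toNat := by
    rw [Finset.mem_range, hd2]; omega
  have hcast : ((can.toNat : Int)) = can := Int.toNat_of_nonneg hcan0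
  unfold pvRem
  rw [← Finset.add_sum_erase _ _ hj0mem, ← Finset.add_sum_erase _
    (fun (j : Nat) => if ((j : Int) ∈ (S.add r).add q ∨ pvPm k (j : Int) ∈ (S.add r).add q) then 0
      else pvContrib k s (j : Int)) hj0mem]
  have hterm1 : (if ((can.toNat : Int) ∈ S ∨ pvPm k (can.toNat : Int) ∈ S) then 0
      else pvContrib k s (can.toNat : Int)) = pvContrib k s can := by
    rw [hcast, if_neg]
    push_neg
    constructor
    · rcases hcanset with h | h <;> rw [h] <;> assumption
    · rcases hpmcan with h | h <;> rw [h] <;> assumption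
  have hterm2 : (if ((can.toNat : Int) ∈ (S.add r).add q ∨ pvPm k (can.toNat : Int) ∈ (S.add r).add q)
      then 0 else pvContrib k s (can.toNat : Int)) = 0 := by
    rw [hcast, if_pos (Or.inl hcanS')]
  rw [hterm1, hterm2]
  have hcontrib : pvContrib k s can = pvContrib k s r := by
    rcases hcanset with h | h
    · rw [h]
    · rcases eq_or_ne q r with h' | h'
      · rw [h, h']
      · rw [h]
        unfold pvContrib
        rw [hqr, ← hq, if_neg (by omega), if_neg h']
        exact max_comm _ _
  have hsums : ∀ j ∈ (Finset.range (PySem.Int.floordiv k 2 + 1).toNat).erase can.toNat,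
      (if ((j : Int) ∈ S ∨ pvPm k (j : Int) ∈ S) then 0 else pvContrib k s (j : Int))
      = (if ((j : Int) ∈ (S.add r).add q ∨ pvPm k (j : Int) ∈ (S.add r).add q) then 0
        else pvContrib k s (j : Int)) := by
    intro j hj
    rw [Finset.mem_erase, Finset.mem_range, hd2] at hj
    obtain ⟨hjne, hjlt⟩ := hj
    have hi0 : (0 : Int) ≤ (j : Int) := by omega
    have hile : (j : Int) ≤ k / 2 := by omega
    have hik : (j : Int) < k := by omega
    have hine : (j : Int) ≠ can := by omega
    have hinr : (j : Int) ≠ r ∧ (j : Int) ≠ q := by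
      rcases eq_or_ne r 0 with h | h
      · simp [h] at hqchar; constructor <;> omega
      · rw [if_neg h] at hqchar; constructor <;> omega
    have hpmnr : pvPm k (j : Int) ≠ r ∧ pvPm k (j : Int) ≠ q := by
      constructor
      · intro h
        have : pvPm k (pvPm k (j : Int)) = pvPm k r := by rw [h]
        rw [pvPm_invol hk hi0 hik] at this
        exact hinr.2 (by rw [this])
      · intro h
        have : pvPm k (pvPm k (j : Int)) = pvPm k q := by rw [h]
        rw [pvPm_invol hk hi0 hik, hqr] at this
        exact hinr.1 this
    have hiff : ((j : Int) ∈ S ∨ pvPm k (j : Int) ∈ S) ↔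
        ((j : Int) ∈ (S.add r).add q ∨ pvPm k (j : Int) ∈ (S.add r).add q) := by
      rw [hmemS', hmemS']
      constructor
      · rintro (h | h)
        · exact Or.inl (Or.inl (Or.inl h))
        · exact Or.inr (Or.inl (Or.inl h))
      · rintro ((⟨h | h⟩ | h) | (⟨h | h⟩ | h))
        · exact Or.inl h
        · exact absurd h hinr.1
        · exact absurd h hinr.2
        · exact Or.inr h
        · exact absurd h hpmnr.1
        · exact absurd h hpmnr.2
    by_cases h : ((j : Int) ∈ S ∨ pvPm k (j : Int) ∈ S)
    · rw [if_pos h, if_pos (hiff.mp h)]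
    · rw [if_neg h, if_neg (fun h' => h (hiff.mpr h'))]
  rw [Finset.sum_congr rfl hsums, hcontrib, zero_add]

-- proof-side recursive restatement of the pairing loop: head/last of the remaining window,
-- recursing on slices (fuel = window length suffices)
def pvPairUp (k : Int) (c : PySem.Dict Int Int) (fuel : Nat) (rs : List Int) : Int :=
  match fuel with
  | 0 => 0
  | fuel + 1 =>
    if rs = [] then 0
    else
      let a := (PySem.List.pyGet? rs 0).getD 0
      let b := (PySem.List.pyGet? rs (-1)).getD 0
      if a = b then (if 2 * a = k then 1 else c.getD a 0)
      else if a + b < k then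
        c.getD a 0 + pvPairUp k c fuel (PySem.List.slice rs (some 1) none)
      else if a + b > k then
        c.getD b 0 + pvPairUp k c fuel (PySem.List.slice rs none (some (-1)))
      else
        max (c.getD a 0) (c.getD b 0) + pvPairUp k c fuel (PySem.List.slice rs (some 1) (some (-1)))

-- rs[1:-1] on a nonempty list drops the head and the last element
theorem pvSlice_mid (a : Int) (t : List Int) :
    PySem.List.slice (a :: t) (some 1) (some (-1)) = t.dropLast := by
  simp [PySem.List.slice]
  exact List.dropLast_eq_take.symm

-- B's two-pointer pairing over a window of sorted distinct present residues adds exactly the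
-- contributions of the pair classes not yet covered by the seen-set S
theorem pvPairUp_eq {k : Int} (hk : 0 < k) (s : List Int) (c : PySem.Dict Int Int)
    (hc : ∀ p : Int, c.getD p 0 = pvCnt k s p) :
    ∀ (n : Nat) (W : List Int) (S : PySem.Set Int),
      W.length ≤ n →
      W.Pairwise (· < ·) →
      (∀ x ∈ W, 0 < x ∧ x < k ∧ pvCnt k s x ≠ 0) →
      (∀ x ∈ S, pvPm k x ∈ S) →
      (∀ x ∈ W, x ∉ S ∧ pvPm k x ∉ S) →
      (∀ r : Int, 0 ≤ r → r < k → pvCnt k s r ≠ 0 → r ∈ S ∨ r ∈ W) →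
      (∀ x ∈ W, pvCnt k s (pvPm k x) ≠ 0 → pvPm k x ∈ W) →
      pvPairUp k c n W = pvRem k s S := by
  intro n
  induction n with
  | zero =>
    intro W S hlen _ _ hScl _ hcov _
    cases W with
    | nil =>
      rw [pvRem_zero hk s S (fun r h0 h1 hne => (hcov r h0 h1 hne).resolve_right (by simp))]
      rfl
    | cons a t => simp at hlen
  | succ n ih =>
    intro W S hlen hpw hbnd hScl hdis hcov hclW
    cases W with
    | nil =>
      rw [pvRem_zero hk s S (fun r h0 h1 hne => (hcov r h0 h1 hne).resolve_right (by simp))]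
      rfl
    | cons a t =>
      obtain ⟨ha0, hak, hacnt⟩ := hbnd a (by simp)
      have hpma : pvPm k a = k - a := by
        rw [pvPm_char hk (by omega) hak, if_neg (by omega)]
      have hcnt_nn : ∀ r : Int, 0 ≤ pvCnt k s r := fun r => Int.natCast_nonneg _
      rcases t.eq_nil_or_concat with rfl | ⟨t', b, rfl⟩
      · -- window is the single residue [a]
        have hstep := pvRem_step hk s S a (by omega) hak (hdis a (by simp)).1 hScl
        have hrem0 : pvRem k s ((S.add a).add (pvPm k a)) = 0 := by
          apply pvRem_zero hk
          intro r h0 h1 hne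
          rw [PySem.Set.mem_add, PySem.Set.mem_add]
          rcases hcov r h0 h1 hne with h | h
          · exact Or.inl (Or.inl h)
          · exact Or.inl (Or.inr (by simpa using h))
        rw [hstep, hrem0, add_zero]
        have hga : ((PySem.List.pyGet? [a] 0).getD 0 : Int) = a := by simp [pysem]
        have hgb : ((PySem.List.pyGet? [a] (-1)).getD 0 : Int) = a := by
          have h1a : ([a] : List Int) = [] ++ [a] := by simp
          rw [h1a, PySem.List.pyGet?_neg_one]
          simp
        simp only [pvPairUp]
        rw [if_neg (List.cons_ne_nil a [])]
        simp only [hga, hgb]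
        rw [if_pos trivial]
        by_cases h2a : 2 * a = k
        · rw [if_pos h2a]
          unfold pvContrib
          rw [if_pos (by omega), min_eq_right (by have := hcnt_nn a; omega)]
        · rw [if_neg h2a]
          unfold pvContrib
          rw [if_neg (by omega)]
          have hpm0 : pvCnt k s (pvPm k a) = 0 := by
            by_contra h
            have := hclW a (by simp) h
            rw [hpma] at this
            simp at this
            omega
          rw [hpm0, hc, max_eq_left (hcnt_nn a)]
      · -- window is a :: t' ++ [b] with a < … < b
        simp only [List.concat_eq_append] at *
        have hsplit : a :: (t' ++ [b]) = (a :: t') ++ [b] := rfl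
        have hpwc := List.pairwise_cons.mp hpw
        have ha_lt : ∀ x ∈ t' ++ [b], a < x := hpwc.1
        have hab : a < b := ha_lt b (by simp)
        have hlt_b : ∀ x ∈ a :: t', x < b := by
          intro x hx
          rcases List.mem_cons.mp hx with rfl | hx
          · exact hab
          · exact (List.pairwise_append.mp hpwc.2).2.2 x hx b (by simp)
        have hge_a : ∀ x ∈ a :: (t' ++ [b]), a ≤ x := by
          intro x hx
          rcases List.mem_cons.mp hx with rfl | hx
          · omega
          · exact le_of_lt (ha_lt x hx)
        have hle_b : ∀ x ∈ a :: (t' ++ [b]), x ≤ b := by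
          intro x hx
          rcases List.mem_cons.mp hx with rfl | hx
          · omega
          · rcases List.mem_append.mp hx with hx | hx
            · exact le_of_lt (hlt_b x (by simp [hx]))
            · simp at hx; omega
        obtain ⟨hb0, hbk, hbcnt⟩ := hbnd b (by simp)
        have hpmb : pvPm k b = k - b := by
          rw [pvPm_char hk (by omega) hbk, if_neg (by omega)]
        -- evaluate rs[0], rs[-1] and the three slices
        have hga : ((PySem.List.pyGet? (a :: (t' ++ [b])) 0).getD 0 : Int) = a := by simp [pysem]
        have hgb : ((PySem.List.pyGet? (a :: (t' ++ [b])) (-1)).getD 0 : Int) = b := by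
          rw [hsplit, PySem.List.pyGet?_neg_one]
          simp
          rw [hsplit, List.getLast?_concat]
          rfl
        have htail : PySem.List.slice (a :: (t' ++ [b])) (some 1) none = t' ++ [b] := by
          rw [PySem.List.slice_from_one]
          rfl
        have hdropl : PySem.List.slice (a :: (t' ++ [b])) none (some (-1)) = a :: t' := by
          rw [PySem.List.slice_to_neg_one, hsplit, List.dropLast_concat]
        have hmid : PySem.List.slice (a :: (t' ++ [b])) (some 1) (some (-1)) = t' := by
          rw [pvSlice_mid, List.dropLast_concat]
        -- the one-step unfolding of the recursion
        simp only [pvPairUp]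
        rw [if_neg (List.cons_ne_nil a (t' ++ [b]))]
        simp only [hga, hgb, htail, hdropl, hmid]
        rw [if_neg (show ¬ a = b by omega)]
        -- pvPm sends members of the window to k - x, injectively
        have hpm_of_mem : ∀ x ∈ a :: (t' ++ [b]), pvPm k x = k - x := by
          intro x hx
          obtain ⟨hx0, hxk, _⟩ := hbnd x hx
          rw [pvPm_char hk (by omega) hxk, if_neg (by omega)]
        have hpm_eq_iff : ∀ x y : Int, 0 ≤ x → x < k → 0 ≤ y → y < k →
            pvPm k x = pvPm k y → x = y := fun x y hx0 hx1 hy0 hy1 h =>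
          pvPm_inj hk hx0 hx1 hy0 hy1 h
        by_cases h1 : a + b < k
        · rw [if_pos h1]
          -- pair class of a: its partner k - a lies above b, hence is absent
          have hka_notW : (k - a) ∉ a :: (t' ++ [b]) := fun h => by
            have := hle_b _ h; omega
          have hka_cnt : pvCnt k s (k - a) = 0 := by
            by_contra h
            have := hclW a (by simp) (by rwa [hpma])
            rw [hpma] at this
            exact hka_notW this
          have hcontrib : pvContrib k s a = c.getD a 0 := by
            unfold pvContrib
            rw [hpma, if_neg (by omega), hka_cnt, hc, max_eq_left (hcnt_nn a)]
          have hstep := pvRem_step hk s S a (by omega) hak (hdis a (by simp)).1 hScl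
          rw [hstep, hcontrib, hpma]
          congr 1
          -- tail window t' ++ [b] with seen-set S ∪ {a, k - a}
          apply ih (t' ++ [b]) ((S.add a).add (k - a))
          · have := hlen; simp at this ⊢; omega
          · exact hpwc.2
          · intro x hx; exact hbnd x (by simp [hx])
          · intro x hx
            rw [PySem.Set.mem_add, PySem.Set.mem_add] at hx
            rw [PySem.Set.mem_add, PySem.Set.mem_add]
            rcases hx with (hx | rfl) | rfl
            · exact Or.inl (Or.inl (hScl x hx))
            · rw [hpma]; exact Or.inr rfl
            · rw [pvPm_char hk (by omega) (by omega), if_neg (by omega)]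
              left; right; omega
          · intro x hx
            have hxW : x ∈ a :: (t' ++ [b]) := by simp [hx]
            obtain ⟨hx0, hxk, _⟩ := hbnd x hxW
            have hxa : a < x := ha_lt x hx
            have hxb : x ≤ b := hle_b x hxW
            have hpmx : pvPm k x = k - x := hpm_of_mem x hxW
            obtain ⟨hxS, hpxS⟩ := hdis x hxW
            constructor
            · rw [PySem.Set.mem_add, PySem.Set.mem_add]
              rintro ((h | rfl) | h)
              · exact hxS h
              · omega
              · omega
            · rw [PySem.Set.mem_add, PySem.Set.mem_add]
              rintro ((h | h) | h)
              · exact hpxS h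
              · rw [hpmx] at h; omega
              · rw [hpmx] at h; omega
          · intro r h0 h1 hne
            rw [PySem.Set.mem_add, PySem.Set.mem_add]
            rcases hcov r h0 h1 hne with h | h
            · exact Or.inl (Or.inl (Or.inl h))
            · rcases List.mem_cons.mp h with rfl | h
              · exact Or.inl (Or.inl (Or.inr rfl))
              · exact Or.inr h
          · intro x hx hne
            have hxW : x ∈ a :: (t' ++ [b]) := by simp [hx]
            have hmem := hclW x hxW hne
            have hpmx : pvPm k x = k - x := hpm_of_mem x hxW
            have hxa : a < x := ha_lt x hx
            rcases List.mem_cons.mp hmem with heq | h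
            · exfalso
              rw [hpmx] at heq
              have := hle_b x hxW
              omega
            · exact h
        · rw [if_neg h1]
          by_cases h2 : a + b > k
          · rw [if_pos h2]
            -- pair class of b: its partner k - b lies below a, hence is absent
            have hkb_notW : (k - b) ∉ a :: (t' ++ [b]) := fun h => by
              have := hge_a _ h; omega
            have hkb_cnt : pvCnt k s (k - b) = 0 := by
              by_contra h
              have := hclW b (by simp) (by rwa [hpmb])
              rw [hpmb] at this
              exact hkb_notW this
            have hcontrib : pvContrib k s b = c.getD b 0 := by
              unfold pvContrib
              rw [hpmb, if_neg (by omega), hkb_cnt, hc, max_eq_left (hcnt_nn b)]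
            have hstep := pvRem_step hk s S b (by omega) hbk (hdis b (by simp)).1 hScl
            rw [hstep, hcontrib, hpmb]
            congr 1
            apply ih (a :: t') ((S.add b).add (k - b))
            · have := hlen; simp at this ⊢; omega
            · rw [hsplit] at hpw
              exact (List.pairwise_append.mp hpw).1
            · intro x hx; exact hbnd x (by rcases List.mem_cons.mp hx with rfl | hx <;> simp [hx])
            · intro x hx
              rw [PySem.Set.mem_add, PySem.Set.mem_add] at hx
              rw [PySem.Set.mem_add, PySem.Set.mem_add]
              rcases hx with (hx | rfl) | rfl
              · exact Or.inl (Or.inl (hScl x hx))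
              · rw [hpmb]; exact Or.inr rfl
              · rw [pvPm_char hk (by omega) (by omega), if_neg (by omega)]
                left; right; omega
            · intro x hx
              have hxW : x ∈ a :: (t' ++ [b]) := by
                rcases List.mem_cons.mp hx with rfl | hx <;> simp [hx]
              obtain ⟨hx0, hxk, _⟩ := hbnd x hxW
              have hxb : x < b := hlt_b x hx
              have hxa : a ≤ x := hge_a x hxW
              have hpmx : pvPm k x = k - x := hpm_of_mem x hxW
              obtain ⟨hxS, hpxS⟩ := hdis x hxW
              constructor
              · rw [PySem.Set.mem_add, PySem.Set.mem_add]
                rintro ((h | rfl) | h)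
                · exact hxS h
                · omega
                · omega
              · rw [PySem.Set.mem_add, PySem.Set.mem_add]
                rintro ((h | h) | h)
                · exact hpxS h
                · rw [hpmx] at h; omega
                · rw [hpmx] at h; omega
            · intro r h0 h1 hne
              rw [PySem.Set.mem_add, PySem.Set.mem_add]
              rcases hcov r h0 h1 hne with h | h
              · exact Or.inl (Or.inl (Or.inl h))
              · rcases List.mem_cons.mp h with rfl | h
                · exact Or.inr (by simp)
                · rcases List.mem_append.mp h with h | h
                  · exact Or.inr (by simp [h])
                  · simp at h
                    subst h
                    exact Or.inl (Or.inl (Or.inr rfl))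
            · intro x hx hne
              have hxW : x ∈ a :: (t' ++ [b]) := by
                rcases List.mem_cons.mp hx with rfl | hx <;> simp [hx]
              have hmem := hclW x hxW hne
              have hpmx : pvPm k x = k - x := hpm_of_mem x hxW
              have hxb : x < b := hlt_b x hx
              have hxa : a ≤ x := hge_a x hxW
              rcases List.mem_cons.mp hmem with heq | h
              · exact List.mem_cons.mpr (Or.inl heq)
              · rcases List.mem_append.mp h with h | h
                · exact List.mem_cons.mpr (Or.inr h)
                · exfalso
                  simp at h
                  rw [hpmx] at h
                  omega
          · -- a + b = k: a and b are partners
            rw [if_neg h2]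
            have hab_k : a + b = k := by omega
            have hcontrib : pvContrib k s a = max (c.getD a 0) (c.getD b 0) := by
              unfold pvContrib
              rw [hpma, if_neg (by omega), hc, hc]
              congr 2
              omega
            have hstep := pvRem_step hk s S a (by omega) hak (hdis a (by simp)).1 hScl
            rw [hstep, hcontrib, hpma]
            congr 1
            have hbka : k - a = b := by omega
            rw [hbka]
            apply ih t' ((S.add a).add b)
            · have := hlen; simp at this ⊢; omega
            · rw [hsplit] at hpw
              exact List.Pairwise.sublist (by simp) (List.pairwise_append.mp hpw).1
            · intro x hx; exact hbnd x (by simp [hx])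
            · intro x hx
              rw [PySem.Set.mem_add, PySem.Set.mem_add] at hx
              rw [PySem.Set.mem_add, PySem.Set.mem_add]
              rcases hx with (hx | rfl) | rfl
              · exact Or.inl (Or.inl (hScl x hx))
              · rw [hpma]; right; omega
              · rw [hpmb]; left; right; omega
            · intro x hx
              have hxW : x ∈ a :: (t' ++ [b]) := by simp [hx]
              obtain ⟨hx0, hxk, _⟩ := hbnd x hxW
              have hxa : a < x := ha_lt x (by simp [hx])
              have hxb : x < b := hlt_b x (by simp [hx])
              have hpmx : pvPm k x = k - x := hpm_of_mem x hxW
              obtain ⟨hxS, hpxS⟩ := hdis x hxW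
              constructor
              · rw [PySem.Set.mem_add, PySem.Set.mem_add]
                rintro ((h | rfl) | h)
                · exact hxS h
                · omega
                · omega
              · rw [PySem.Set.mem_add, PySem.Set.mem_add]
                rintro ((h | h) | h)
                · exact hpxS h
                · rw [hpmx] at h; omega
                · rw [hpmx] at h; omega
            · intro r h0 h1 hne
              rw [PySem.Set.mem_add, PySem.Set.mem_add]
              rcases hcov r h0 h1 hne with h | h
              · exact Or.inl (Or.inl (Or.inl h))
              · rcases List.mem_cons.mp h with rfl | h
                · exact Or.inl (Or.inl (Or.inr rfl))
                · rcases List.mem_append.mp h with h | h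
                  · exact Or.inr h
                  · simp at h
                    subst h
                    exact Or.inl (Or.inr rfl)
            · intro x hx hne
              have hxW : x ∈ a :: (t' ++ [b]) := by simp [hx]
              have hmem := hclW x hxW hne
              have hpmx : pvPm k x = k - x := hpm_of_mem x hxW
              have hxa : a < x := ha_lt x (by simp [hx])
              have hxb : x < b := hlt_b x (by simp [hx])
              rcases List.mem_cons.mp hmem with heq | h
              · exfalso; rw [hpmx] at heq; omega
              · rcases List.mem_append.mp h with h | h
                · exact h
                · exfalso
                  simp at h
                  rw [hpmx] at h
                  omega

-- the window rs[i..j] that the two index pointers still have to process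
def pvWin (rs : List Int) (i j : Int) : List Int :=
  (rs.drop i.toNat).take ((j + 1 - i).toNat)

theorem pvGet_nonneg (rs : List Int) (i : Int) (h : 0 ≤ i) :
    PySem.List.pyGet? rs i = rs[i.toNat]? := by
  obtain ⟨n, rfl⟩ : ∃ n : Nat, i = (n : Int) := ⟨i.toNat, by omega⟩
  rw [PySem.List.pyGet?_natCast]
  simp

theorem pvWinElem (rs : List Int) (i j : Int) (m : Nat) :
    (pvWin rs i j)[m]? = if m < (j + 1 - i).toNat then rs[i.toNat + m]? else none := by
  simp [pvWin, List.getElem?_take, List.getElem?_drop]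

theorem pvPairUp_nil (k : Int) (c : PySem.Dict Int Int) (f : Nat) :
    pvPairUp k c f [] = 0 := by
  cases f <;> simp [pvPairUp]

-- one-step unfolding of pvPairUp on a nonempty window, head/last written with Options
theorem pvPairUp_step (k : Int) (c : PySem.Dict Int Int) (n : Nat) (W : List Int) (hW : W ≠ []) :
    pvPairUp k c (n + 1) W =
      (if W.head?.getD 0 = W.getLast?.getD 0 then
        (if 2 * (W.head?.getD 0) = k then 1 else c.getD (W.head?.getD 0) 0)
      else if W.head?.getD 0 + W.getLast?.getD 0 < k then
        c.getD (W.head?.getD 0) 0 + pvPairUp k c n W.tail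
      else if W.head?.getD 0 + W.getLast?.getD 0 > k then
        c.getD (W.getLast?.getD 0) 0 + pvPairUp k c n W.dropLast
      else
        max (c.getD (W.head?.getD 0) 0) (c.getD (W.getLast?.getD 0) 0) +
          pvPairUp k c n W.tail.dropLast) := by
  cases W with
  | nil => exact absurd rfl hW
  | cons w W' =>
    have hga : (PySem.List.pyGet? (w :: W') 0).getD 0 = (w :: W').head?.getD 0 := by
      simp [pysem]
    have hgb : (PySem.List.pyGet? (w :: W') (-1)).getD 0 = (w :: W').getLast?.getD 0 := by
      simp [pysem, List.getLast?_eq_getElem?, List.getElem?_eq_getElem]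
    simp only [pvPairUp]
    rw [if_neg (List.cons_ne_nil w W'), hga, hgb, PySem.List.slice_from_one,
      PySem.List.slice_to_neg_one, pvSlice_mid]
    simp only [List.tail_cons]

-- the index loop computes exactly the recursive pairing of its remaining window
theorem pvLoop_eq_pairUp {k : Int} (c : PySem.Dict Int Int) (rs : List Int)
    (hpw : rs.Pairwise (· < ·)) :
    ∀ (fuel : Nat) (i j res : Int) (F : Nat), 0 ≤ i → j < (rs.length : Int) →
      (j + 1 - i).toNat ≤ fuel → (j + 1 - i).toNat ≤ F →
      pvLoop k c rs fuel i j res = res + pvPairUp k c F (pvWin rs i j) := by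
  intro fuel
  induction fuel with
  | zero =>
    intro i j res F hi hj hf hF
    have hwin : pvWin rs i j = [] := by
      unfold pvWin
      rw [show (j + 1 - i).toNat = 0 by omega]
      simp
    rw [hwin, pvPairUp_nil]
    simp [pvLoop]
  | succ fuel ih =>
    intro i j res F hi hj hf hF
    by_cases hij : i ≤ j
    · have hjn : 0 ≤ j := le_trans hi hij
      have hilen : i.toNat < rs.length := by omega
      have hjlen : j.toNat < rs.length := by omega
      obtain ⟨F', rfl⟩ : ∃ F'', F = F'' + 1 := ⟨F - 1, by omega⟩
      have hwlen : (pvWin rs i j).length = (j + 1 - i).toNat := by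
        unfold pvWin
        simp
        omega
      have hWne : pvWin rs i j ≠ [] := by
        intro h
        rw [h] at hwlen
        simp at hwlen
        omega
      have hgiv : (PySem.List.pyGet? rs i).getD 0 = rs[i.toNat] := by
        rw [pvGet_nonneg rs i hi, List.getElem?_eq_getElem hilen]
        rfl
      have hgjv : (PySem.List.pyGet? rs j).getD 0 = rs[j.toNat] := by
        rw [pvGet_nonneg rs j hjn, List.getElem?_eq_getElem hjlen]
        rfl
      have hwh : (pvWin rs i j).head?.getD 0 = rs[i.toNat] := by
        rw [List.head?_eq_getElem?, pvWinElem rs i j 0, if_pos (by omega)]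
        rw [show i.toNat + 0 = i.toNat from rfl, List.getElem?_eq_getElem hilen]
        rfl
      have hwl : (pvWin rs i j).getLast?.getD 0 = rs[j.toNat] := by
        rw [List.getLast?_eq_getElem?, hwlen, pvWinElem rs i j ((j + 1 - i).toNat - 1),
          if_pos (by omega)]
        rw [show i.toNat + ((j + 1 - i).toNat - 1) = j.toNat by omega,
          List.getElem?_eq_getElem hjlen]
        rfl
      have htl : (pvWin rs i j).tail = pvWin rs (i + 1) j := by
        apply List.ext_getElem?
        intro m
        rw [List.getElem?_tail, pvWinElem, pvWinElem]
        by_cases hc : m + 1 < (j + 1 - i).toNat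
        · rw [if_pos hc, if_pos (by omega)]
          congr 1
          omega
        · rw [if_neg hc, if_neg (by omega)]
      have hdl : ∀ (i' j' : Int), 0 ≤ i' → j' < (rs.length : Int) →
          (pvWin rs i' j').dropLast = pvWin rs i' (j' - 1) := by
        intro i' j' hi' hj'
        have hlen' : (pvWin rs i' j').length = (j' + 1 - i').toNat := by
          unfold pvWin
          simp
          omega
        apply List.ext_getElem?
        intro m
        rw [List.getElem?_dropLast, hlen', pvWinElem rs i' j' m, pvWinElem rs i' (j' - 1) m]
        by_cases hc : m < (j' + 1 - i').toNat - 1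
        · rw [if_pos hc, if_pos (by omega), if_pos (by omega)]
        · rw [if_neg hc, if_neg (by omega)]
      simp only [pvLoop]
      rw [if_pos hij]
      simp only [hgiv, hgjv]
      rw [pvPairUp_step k c F' (pvWin rs i j) hWne, hwh, hwl]
      by_cases hije : i = j
      · subst hije
        rw [if_pos rfl, if_pos rfl]
      · have hlt : rs[i.toNat] < rs[j.toNat] :=
          List.pairwise_iff_getElem.mp hpw i.toNat j.toNat hilen hjlen (by omega)
        rw [if_neg hije, if_neg (show ¬ rs[i.toNat] = rs[j.toNat] by omega)]
        by_cases h1 : rs[i.toNat] + rs[j.toNat] < k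
        · rw [if_pos h1, htl,
            ih (i + 1) j (res + c.getD rs[i.toNat] 0) F' (by omega) hj (by omega) (by omega)]
          rw [if_pos h1]
          ring
        · rw [if_neg h1]
          by_cases h2 : rs[i.toNat] + rs[j.toNat] > k
          · rw [if_pos h2, hdl i j hi hj,
              ih i (j - 1) (res + c.getD rs[j.toNat] 0) F' hi (by omega) (by omega) (by omega)]
            rw [if_neg h1, if_pos h2]
            ring
          · rw [if_neg h2, htl, hdl (i + 1) j (by omega) hj,
              ih (i + 1) (j - 1) _ F' (by omega) (by omega) (by omega) (by omega)]
            rw [if_neg h1, if_neg h2]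
            ring
    · have hwin : pvWin rs i j = [] := by
        unfold pvWin
        rw [show (j + 1 - i).toNat = 0 by omega]
        simp
      rw [hwin, pvPairUp_nil]
      simp only [pvLoop]
      rw [if_neg hij]
      omega

-- B's value is pvRem over the empty seen-set
theorem pvB_eq_rem {k : Int} (hk : 0 < k) (s : List Int) :
    non_div_subset_alt k s = pvRem k s [] := by
  have hcdef : s.foldl
      (fun c x => c.insert (PySem.Int.mod x k) (c.getD (PySem.Int.mod x k) 0 + 1))
      (PySem.Dict.empty : PySem.Dict Int Int)
      = PySem.Dict.counter (s.map (fun x => PySem.Int.mod x k)) := by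
    rw [← PySem.Dict.foldl_insert_getD_add_one_eq_counter, List.foldl_map]
  simp only [non_div_subset_alt]
  rw [hcdef, PySem.Dict.keys_counter]
  set resid := s.map (fun x => PySem.Int.mod x k) with hresid
  set rsl := PySem.List.sorted (PySem.Set.ofList resid) (fun x => x) false with hrsl
  have hpw : rsl.Pairwise (· < ·) := PySem.List.sorted_ofList_pairwise_lt resid
  have hgetD : ∀ p : Int, (PySem.Dict.counter resid).getD p 0 = pvCnt k s p := by
    intro p
    rw [PySem.Dict.getD_counter]
    rfl
  have hmemr : ∀ x : Int, x ∈ rsl ↔ pvCnt k s x ≠ 0 := by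
    intro x
    rw [hrsl, PySem.List.mem_sorted, PySem.Set.mem_ofList]
    unfold pvCnt
    rw [hresid]
    simp [List.count_eq_zero]
  have hbndr : ∀ x ∈ rsl, 0 ≤ x ∧ x < k := by
    intro x hx
    rw [hrsl, PySem.List.mem_sorted, PySem.Set.mem_ofList, hresid] at hx
    obtain ⟨y, _, rfl⟩ := List.mem_map.mp hx
    exact ⟨PySem.Int.mod_nonneg _ hk, PySem.Int.mod_lt _ hk⟩
  have hpm0 : pvPm k 0 = 0 := by rw [pvPm_char hk le_rfl hk]; simp
  have hcnt_nn : ∀ r : Int, 0 ≤ pvCnt k s r := fun r => Int.natCast_nonneg _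
  by_cases hh : rsl.head? = some 0
  · rw [if_pos hh]
    obtain ⟨t, ht⟩ : ∃ t, rsl = 0 :: t := by
      cases hrsl' : rsl with
      | nil => rw [hrsl'] at hh; simp at hh
      | cons r0 rest =>
        rw [hrsl'] at hh
        simp at hh
        exact ⟨rest, by rw [hh]⟩
    have h0cnt : pvCnt k s 0 ≠ 0 := (hmemr 0).mp (by rw [ht]; simp)
    have hstep := pvRem_step hk s [] 0 le_rfl hk (by simp) (by simp)
    have hcontrib0 : pvContrib k s 0 = 1 := by
      unfold pvContrib
      rw [if_pos hpm0, min_eq_right (by have := hcnt_nn 0; omega)]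
    have hlen1 : rsl.length = t.length + 1 := by rw [ht]; rfl
    have hbr := pvLoop_eq_pairUp (k := k) (PySem.Dict.counter resid) rsl hpw rsl.length 1
      ((rsl.length : Int) - 1) 1 t.length (by omega) (by omega) (by omega) (by omega)
    have hwin : pvWin rsl 1 ((rsl.length : Int) - 1) = t := by
      unfold pvWin
      rw [show (((rsl.length : Int) - 1) + 1 - 1).toNat = t.length by omega, ht]
      simp
    rw [hbr, hwin, hstep, hcontrib0]
    congr 1
    have htpw : t.Pairwise (· < ·) := (List.pairwise_cons.mp (ht ▸ hpw)).2
    have ht0 : ∀ x ∈ t, 0 < x := (List.pairwise_cons.mp (ht ▸ hpw)).1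
    have htmem : ∀ x ∈ t, x ∈ rsl := fun x hx => by rw [ht]; simp [hx]
    have hS0 : ∀ x : Int, x ∈ (PySem.Set.add (PySem.Set.add ([] : PySem.Set Int) 0) (pvPm k 0)) ↔ x = 0 := by
      intro x
      rw [PySem.Set.mem_add, PySem.Set.mem_add, hpm0]
      simp
    apply pvPairUp_eq hk s _ hgetD t.length t _ le_rfl htpw
    · intro x hx
      obtain ⟨_, hxk⟩ := hbndr x (htmem x hx)
      exact ⟨ht0 x hx, hxk, (hmemr x).mp (htmem x hx)⟩
    · intro x hx
      rw [hS0] at hx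
      rw [hS0, hx, hpm0]
    · intro x hx
      obtain ⟨hx0, hxk⟩ := hbndr x (htmem x hx)
      constructor
      · rw [hS0]; have := ht0 x hx; omega
      · rw [hS0]
        intro h
        have : x = 0 := pvPm_inj hk hx0 hxk le_rfl hk (by rw [h, hpm0])
        have := ht0 x hx
        omega
    · intro r h0 h1 hne
      have : r ∈ rsl := (hmemr r).mpr hne
      rw [ht] at this
      rcases List.mem_cons.mp this with rfl | h
      · exact Or.inl ((hS0 0).mpr rfl)
      · exact Or.inr h
    · intro x hx hne
      have hmem : pvPm k x ∈ rsl := (hmemr _).mpr hne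
      rw [ht] at hmem
      obtain ⟨hx0, hxk⟩ := hbndr x (htmem x hx)
      rcases List.mem_cons.mp hmem with heq | h
      · exfalso
        have : x = 0 := pvPm_inj hk hx0 hxk le_rfl hk (by rw [heq, hpm0])
        have := ht0 x hx
        omega
      · exact h
  · rw [if_neg hh]
    have h0not : (0 : Int) ∉ rsl := by
      intro h
      cases hrsl' : rsl with
      | nil => rw [hrsl'] at h; simp at h
      | cons r0 rest =>
        rw [hrsl'] at h hh hpw
        have hr0 : 0 ≤ r0 := (hbndr r0 (by rw [hrsl']; simp)).1
        rcases List.mem_cons.mp h with heq | hmm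
        · exact hh (by rw [← heq]; simp)
        · have := (List.pairwise_cons.mp hpw).1 0 hmm
          omega
    have hbr := pvLoop_eq_pairUp (k := k) (PySem.Dict.counter resid) rsl hpw rsl.length 0
      ((rsl.length : Int) - 1) 0 rsl.length (by omega) (by omega) (by omega) (by omega)
    have hwin : pvWin rsl 0 ((rsl.length : Int) - 1) = rsl := by
      unfold pvWin
      rw [show (((rsl.length : Int) - 1) + 1 - 0).toNat = rsl.length by omega]
      simp
    rw [hbr, hwin, zero_add]
    apply pvPairUp_eq hk s _ hgetD rsl.length rsl [] le_rfl hpw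
    · intro x hx
      obtain ⟨hx0, hxk⟩ := hbndr x hx
      refine ⟨?_, hxk, (hmemr x).mp hx⟩
      rcases eq_or_lt_of_le hx0 with heq | h
      · exact absurd (heq ▸ hx) h0not
      · exact h
    · intro x hx; simp at hx
    · intro x _; simp
    · intro r _ _ hne
      exact Or.inr ((hmemr r).mpr hne)
    · intro x hx hne
      exact (hmemr _).mpr hne

-- ===== VERDICT (by name: the statement is the Claim_ definition above) =====
theorem non_div_subset_spec : Claim_equal_non_div_subset := by
  intro k s _ hpre
  unfold Spec_non_div_subset
  rw [pvA_eq_rem hpre s, pvB_eq_rem hpre s]
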